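-- pv_equiv track=rewrite | github.com/xizhuwang/Standard-Cell-Placement-Legalization | Viewer.py | check_coordinate_alignment
-- ===== SOURCE A (Python) =====
-- def check_coordinate_alignment(components_rects, scl_data, components_terminal):
--     """
--     檢查每個元件的起始座標是否能被其所在行的 site_width 和 Height 整除。
--     忽略終端元件。若不對齊，則記錄是 site 還是 row 不對齊。
--     """
--     misaligned_components = {}
--     for comp, x, y, w, h in components_rects:
--         is_terminal = components_terminal.get(comp, False)
--         if is_terminal:
--             continue
--
--         # 找出元件所在的行
--         row_found = False
--         for row in scl_data:
--             row_x, row_y, row_w, row_h, site_width, height_unit = row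
--             if y >= row_y and y + h <= row_y + row_h:
--                 row_found = True
--                 misalignment_reasons = []
--
--                 # 檢查 x 是否能被 site_width 整除
--                 if x % site_width != 0:
--                     misalignment_reasons.append("site")
--
--                 # 檢查 y 是否位於該 row 的起始位置（y_start），或者能被 height_unit 整除
--                 if y != row_y and y % height_unit != 0:
--                     misalignment_reasons.append("row")
--
--                 # 如果有未對齊原因，加入字典
--                 if misalignment_reasons:
--                     misaligned_components[comp] = misalignment_reasons
--                 break
--
--         if not row_found:
--             # 如果找不到所在行，可能已經在 out_of_row_components 中處理
--             continue
--
--     return misaligned_components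
-- ===== SOURCE B (Python) =====
-- def check_coordinate_alignment(components_rects, scl_data, components_terminal):
--     """Row-major sweep: build a parallel vector assigning each component its
--     first containing row, then one pass over components to collect reasons."""
--     def contains(row, comp):
--         return row[1] <= comp[2] and comp[2] + comp[4] <= row[1] + row[3]
--
--     assigned = [None] * len(components_rects)
--     for row in scl_data:
--         assigned = [a if a is not None else (row if contains(row, c) else None)
--                     for a, c in zip(assigned, components_rects)]
--
--     result = {}
--     for (comp, x, y, w, h), row in zip(components_rects, assigned):
--         if row is None or components_terminal.get(comp, False):
--             continue
--         reasons = []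
--         if x % row[4] != 0:
--             reasons.append("site")
--         if y != row[1] and y % row[5] != 0:
--             reasons.append("row")
--         if reasons:
--             result[comp] = reasons
--     return result
-- ===== Notes on version B (the rewrite author's own statement) =====
-- stated objective: alternative
-- what changed: A scans the row list afresh inside the per-component loop with an early break; B transposes the loops: a row-major sweep builds a parallel vector giving each component its first containing row in one pipeline of zip/map passes, then a single pass over components emits the reasons.
import Mathlib
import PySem

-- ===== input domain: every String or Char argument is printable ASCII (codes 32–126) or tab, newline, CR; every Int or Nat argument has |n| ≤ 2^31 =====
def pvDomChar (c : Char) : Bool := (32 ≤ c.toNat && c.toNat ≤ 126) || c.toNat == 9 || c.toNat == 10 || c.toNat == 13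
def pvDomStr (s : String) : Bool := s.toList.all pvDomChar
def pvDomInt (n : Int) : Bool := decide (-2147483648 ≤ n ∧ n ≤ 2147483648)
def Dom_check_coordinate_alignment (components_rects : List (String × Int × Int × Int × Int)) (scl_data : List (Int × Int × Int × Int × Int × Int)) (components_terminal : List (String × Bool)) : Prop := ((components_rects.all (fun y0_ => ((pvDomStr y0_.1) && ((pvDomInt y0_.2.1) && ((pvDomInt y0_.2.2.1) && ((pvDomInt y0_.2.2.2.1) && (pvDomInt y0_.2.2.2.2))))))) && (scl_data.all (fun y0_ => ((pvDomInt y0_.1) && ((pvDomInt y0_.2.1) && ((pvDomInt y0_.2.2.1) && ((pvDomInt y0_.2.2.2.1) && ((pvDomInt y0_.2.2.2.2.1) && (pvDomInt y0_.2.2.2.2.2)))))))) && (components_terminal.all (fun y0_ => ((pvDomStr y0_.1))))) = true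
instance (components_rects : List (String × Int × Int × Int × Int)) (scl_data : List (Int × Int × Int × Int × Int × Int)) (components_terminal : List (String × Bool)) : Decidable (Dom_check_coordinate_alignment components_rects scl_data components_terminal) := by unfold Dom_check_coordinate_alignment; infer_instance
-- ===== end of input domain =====

-- B replaces A's per-component rescans of the row list by a row-major sweep that
-- builds a parallel first-containing-row vector, then a single pass over components
-- (objective: alternative structure, same asymptotic cost).

-- ===== PORT A =====
-- A's inner `for row in scl_data: … break` loop (reached only for non-terminal components)
def aScanRows (comp : String) (x y h : Int) (acc : PySem.Dict String (List String)) :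
    List (Int × Int × Int × Int × Int × Int) → PySem.Dict String (List String)
  | [] => acc
  | (_, row_y, _, row_h, site_width, height_unit) :: rest =>
    if y ≥ row_y ∧ y + h ≤ row_y + row_h then
      let reasons : List String :=
        (if PySem.Int.mod x site_width ≠ 0 then ["site"] else []) ++
        (if y ≠ row_y ∧ PySem.Int.mod y height_unit ≠ 0 then ["row"] else [])
      if reasons ≠ [] then acc.insert comp reasons else acc
    else aScanRows comp x y h acc rest

def check_coordinate_alignment (components_rects : List (String × Int × Int × Int × Int)) (scl_data : List (Int × Int × Int × Int × Int × Int)) (components_terminal : List (String × Bool)) : List (String × List String) :=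
  (components_rects.foldl (fun acc c =>
      match c with
      | (comp, x, y, _, h) =>
        if (PySem.Dict.mk components_terminal).getD comp false then acc
        else aScanRows comp x y h acc scl_data)
    PySem.Dict.empty).items

-- ===== PORT B =====
def bContains (row : Int × Int × Int × Int × Int × Int) (c : String × Int × Int × Int × Int) : Bool :=
  row.2.1 ≤ c.2.2.1 && c.2.2.1 + c.2.2.2.2 ≤ row.2.1 + row.2.2.2.1

-- one row of the sweep: the list comprehension over zip(assigned, components_rects)
def bStep (components_rects : List (String × Int × Int × Int × Int))
    (assigned : List (Option (Int × Int × Int × Int × Int × Int)))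
    (row : Int × Int × Int × Int × Int × Int) : List (Option (Int × Int × Int × Int × Int × Int)) :=
  (assigned.zip components_rects).map
    (fun p => if p.1.isSome then p.1 else if bContains row p.2 then some row else none)

def bSweep (components_rects : List (String × Int × Int × Int × Int))
    (scl_data : List (Int × Int × Int × Int × Int × Int)) :
    List (Option (Int × Int × Int × Int × Int × Int)) :=
  scl_data.foldl (bStep components_rects) (List.replicate components_rects.length none)

def check_coordinate_alignment_alt (components_rects : List (String × Int × Int × Int × Int)) (scl_data : List (Int × Int × Int × Int × Int × Int)) (components_terminal : List (String × Bool)) : List (String × List String) :=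
  ((components_rects.zip (bSweep components_rects scl_data)).foldl (fun res p =>
      match p with
      | (_, none) => res
      | ((comp, x, y, _, _), some (_, row_y, _, _, site_width, height_unit)) =>
        if (PySem.Dict.mk components_terminal).getD comp false then res
        else
          let reasons : List String :=
            (if PySem.Int.mod x site_width ≠ 0 then ["site"] else []) ++
            (if y ≠ row_y ∧ PySem.Int.mod y height_unit ≠ 0 then ["row"] else [])
          if reasons ≠ [] then res.insert comp reasons else res)
    PySem.Dict.empty).items

-- ===== PRECONDITION & SPEC =====
-- Pre_ excludes exactly the inputs on which the Python raises ZeroDivisionError: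
-- those where the first row containing some non-terminal component has
-- site_width = 0, or has height_unit = 0 while the component's y differs from the
-- row's y. On every other input A returns normally.
def Pre_check_coordinate_alignment (components_rects : List (String × Int × Int × Int × Int)) (scl_data : List (Int × Int × Int × Int × Int × Int)) (components_terminal : List (String × Bool)) : Prop :=
  ∀ c ∈ components_rects,
    (PySem.Dict.mk components_terminal).getD c.1 false = false →
    ((scl_data.find? (fun r => r.2.1 ≤ c.2.2.1 && c.2.2.1 + c.2.2.2.2 ≤ r.2.1 + r.2.2.2.1)).all
      (fun r => r.2.2.2.2.1 ≠ 0 && (c.2.2.1 == r.2.1 || r.2.2.2.2.2 ≠ 0))) = true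
instance (components_rects : List (String × Int × Int × Int × Int)) (scl_data : List (Int × Int × Int × Int × Int × Int)) (components_terminal : List (String × Bool)) : Decidable (Pre_check_coordinate_alignment components_rects scl_data components_terminal) := by unfold Pre_check_coordinate_alignment; infer_instance

def pvWitness_check_coordinate_alignment : (List (String × Int × Int × Int × Int)) × (List (Int × Int × Int × Int × Int × Int)) × (List (String × Bool)) :=
  ([("a", 3, 5, 2, 1)], [(0, 0, 100, 10, 2, 5)], [])

def Spec_check_coordinate_alignment (components_rects : List (String × Int × Int × Int × Int)) (scl_data : List (Int × Int × Int × Int × Int × Int)) (components_terminal : List (String × Bool)) (out : List (String × List String)) : Prop := out = check_coordinate_alignment_alt components_rects scl_data components_terminal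
instance (components_rects : List (String × Int × Int × Int × Int)) (scl_data : List (Int × Int × Int × Int × Int × Int)) (components_terminal : List (String × Bool)) (out : List (String × List String)) : Decidable (Spec_check_coordinate_alignment components_rects scl_data components_terminal out) := by unfold Spec_check_coordinate_alignment; infer_instance

-- ===== CLAIM (what is proved, stated in full; the proofs are below) =====
def Claim_equal_check_coordinate_alignment : Prop := ∀ (components_rects : List (String × Int × Int × Int × Int)) (scl_data : List (Int × Int × Int × Int × Int × Int)) (components_terminal : List (String × Bool)), Dom_check_coordinate_alignment components_rects scl_data components_terminal → Pre_check_coordinate_alignment components_rects scl_data components_terminal → Spec_check_coordinate_alignment components_rects scl_data components_terminal (check_coordinate_alignment components_rects scl_data components_terminal)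

-- ===== LEMMAS AND PROOFS =====

-- the first row of scl containing component c
def pfind (c : String × Int × Int × Int × Int) (scl : List (Int × Int × Int × Int × Int × Int)) :
    Option (Int × Int × Int × Int × Int × Int) :=
  scl.find? (fun r => bContains r c)

-- the shared "reasons" body, applied to a found row
def procRow (comp : String) (x y : Int) (r : Int × Int × Int × Int × Int × Int)
    (acc : PySem.Dict String (List String)) : PySem.Dict String (List String) :=
  let reasons : List String :=
    (if PySem.Int.mod x r.2.2.2.2.1 ≠ 0 then ["site"] else []) ++
    (if y ≠ r.2.1 ∧ PySem.Int.mod y r.2.2.2.2.2 ≠ 0 then ["row"] else [])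
  if reasons ≠ [] then acc.insert comp reasons else acc

lemma aScan_eq_pfind (comp : String) (x y w h : Int) (acc : PySem.Dict String (List String)) :
    ∀ scl, aScanRows comp x y h acc scl =
      match pfind (comp, x, y, w, h) scl with
      | none => acc
      | some r => procRow comp x y r acc := by
  intro scl
  induction scl with
  | nil => rfl
  | cons r rest ih =>
    obtain ⟨rx, ry, rw, rh, sw, hu⟩ := r
    by_cases hc : y ≥ ry ∧ y + h ≤ ry + rh
    · simp [aScanRows, pfind, List.find?, bContains, hc.1, hc.2, procRow]
    · have hb : bContains (rx, ry, rw, rh, sw, hu) (comp, x, y, w, h) = false := by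
        simp only [bContains, Bool.and_eq_false_iff, decide_eq_false_iff_not]; omega
      rw [show pfind (comp, x, y, w, h) ((rx, ry, rw, rh, sw, hu) :: rest) =
            pfind (comp, x, y, w, h) rest from by simp [pfind, hb]]
      simp only [aScanRows, if_neg hc]
      exact ih

lemma sweep_get (crs : List (String × Int × Int × Int × Int)) :
    ∀ (scl : List (Int × Int × Int × Int × Int × Int)) (a : List (Option (Int × Int × Int × Int × Int × Int)))
      (i : Nat) (ai : Option (Int × Int × Int × Int × Int × Int)) (c : String × Int × Int × Int × Int),
      a[i]? = some ai → crs[i]? = some c →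
      (scl.foldl (bStep crs) a)[i]? = some (ai.or (pfind c scl)) := by
  intro scl
  induction scl with
  | nil => intro a i ai c ha _; simpa [pfind] using ha
  | cons r rest ih =>
    intro a i ai c ha hc
    have hz : (a.zip crs)[i]? = some (ai, c) := by
      rw [List.zip_eq_zipWith, List.getElem?_zipWith, ha, hc]
    have hstep : (bStep crs a r)[i]? =
        some (if ai.isSome then ai else if bContains r c then some r else none) := by
      simp [bStep, List.getElem?_map, hz]
    have := ih (bStep crs a r) i
      (if ai.isSome then ai else if bContains r c then some r else none) c hstep hc
    rw [List.foldl_cons, this]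
    congr 1
    cases ai with
    | some v => rfl
    | none =>
      simp only [Option.isSome_none, Bool.false_eq_true, if_false, Option.none_or, pfind, List.find?]
      cases bContains r c <;> simp

lemma sweep_len (crs : List (String × Int × Int × Int × Int)) :
    ∀ (scl : List (Int × Int × Int × Int × Int × Int)) (a : List (Option (Int × Int × Int × Int × Int × Int))),
      a.length = crs.length → (scl.foldl (bStep crs) a).length = crs.length := by
  intro scl
  induction scl with
  | nil => intro a ha; simpa using ha
  | cons r rest ih =>
    intro a ha
    rw [List.foldl_cons]
    exact ih _ (by simp [bStep, ha])

lemma sweep_eq_map (crs : List (String × Int × Int × Int × Int)) (scl : List (Int × Int × Int × Int × Int × Int)) :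
    bSweep crs scl = crs.map (fun c => pfind c scl) := by
  apply List.ext_getElem?
  intro i
  by_cases hi : i < crs.length
  · have hc : crs[i]? = some crs[i] := List.getElem?_eq_getElem hi
    have ha : (List.replicate crs.length (none : Option (Int × Int × Int × Int × Int × Int)))[i]? = some none := by
      simp [hi]
    have := sweep_get crs scl _ i none crs[i] ha hc
    simp only [bSweep, this, Option.none_or, List.getElem?_map, hc, Option.map_some]
  · have h1 : (bSweep crs scl)[i]? = none := by
      apply List.getElem?_eq_none
      have hl : (bSweep crs scl).length = crs.length := sweep_len crs scl _ (by simp)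
      omega
    have h2 : (crs.map (fun c => pfind c scl))[i]? = none := by
      apply List.getElem?_eq_none; rw [List.length_map]; omega
    rw [h1, h2]

lemma zip_self_map {α : Type} (l : List α) : l.zip l = l.map (fun x => (x, x)) := by
  induction l with
  | nil => rfl
  | cons x xs ih => simp [List.zip_cons_cons, ih]  -- zip on cons

-- ===== VERDICT (by name: the statement is the Claim_ definition above) =====
theorem check_coordinate_alignment_spec : Claim_equal_check_coordinate_alignment := by
  intro crs scl ct _ _
  unfold Spec_check_coordinate_alignment check_coordinate_alignment check_coordinate_alignment_alt
  rw [sweep_eq_map, List.zip_map_right, zip_self_map, List.map_map, List.foldl_map]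
  congr 1
  apply List.foldl_ext
  intro acc c _
  obtain ⟨comp, x, y, w, h⟩ := c
  by_cases ht : (PySem.Dict.mk ct).getD comp false
  · cases hf : pfind (comp, x, y, w, h) scl <;> simp [ht, hf]
  · cases hf : pfind (comp, x, y, w, h) scl with
    | none => simp [ht, hf, aScan_eq_pfind comp x y w h acc scl]
    | some r =>
      obtain ⟨rx, ry, rw, rh, sw, hu⟩ := r
      simp [ht, hf, aScan_eq_pfind comp x y w h acc scl, procRow]
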